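-- pv_equiv track=rewrite | github.com/divyatejakotteti/100DaysOfCode | Day 35/BeautifulTriplets.py | beautifulTriplets
-- ===== SOURCE A (Python) =====
-- def beautifulTriplets(d, arr):
--     count=0
--     for i in range(len(arr)-2):
--         for j in range(i+1,len(arr)-1):
--             if ((arr[j] - arr[i] == d)):
--                 for k in range(j+1,len(arr)):
--                     if((arr[k] - arr[j] == d)):
--                         count+= 1
--                         break
--     return(count)
-- ===== SOURCE B (Python) =====
-- def beautifulTriplets(d, arr):
--     # Backward pass: has_next[j] = whether arr[j] + d occurs after position j.
--     n = len(arr)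
--     has_next = [False] * n
--     seen = set()
--     for j in range(n - 1, -1, -1):
--         has_next[j] = (arr[j] + d) in seen
--         seen.add(arr[j])
--     # Forward pass: count pairs (i, j) with i < j, arr[i] == arr[j] - d and has_next[j].
--     count = 0
--     prefix = {}
--     for x, h in zip(arr, has_next):
--         if h:
--             count += prefix.get(x - d, 0)
--         prefix[x] = prefix.get(x, 0) + 1
--     return count
-- ===== Notes on version B (the rewrite author's own statement) =====
-- stated objective: faster
-- what changed: Replaced the triple nested index scan by two linear passes: a backward pass recording in a set whether arr[j]+d occurs later, and a forward pass with a prefix counter dict summing, for each valid middle element, the number of earlier elements equal to arr[j]-d.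
import Mathlib
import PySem

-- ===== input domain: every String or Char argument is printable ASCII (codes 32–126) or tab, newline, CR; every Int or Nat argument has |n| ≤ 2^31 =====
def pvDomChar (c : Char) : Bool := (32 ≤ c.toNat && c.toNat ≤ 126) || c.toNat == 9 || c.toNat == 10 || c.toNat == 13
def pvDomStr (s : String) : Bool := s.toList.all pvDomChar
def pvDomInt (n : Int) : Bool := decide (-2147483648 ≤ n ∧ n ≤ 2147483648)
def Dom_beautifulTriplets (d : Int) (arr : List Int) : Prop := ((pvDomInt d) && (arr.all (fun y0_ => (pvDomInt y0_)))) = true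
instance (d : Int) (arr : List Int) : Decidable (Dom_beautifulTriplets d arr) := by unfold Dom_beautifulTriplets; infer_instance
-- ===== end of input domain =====

-- B replaces A's triple nested index scan by two linear passes (a suffix-membership set and a prefix counter dict); asymptotically faster.

-- ===== PORT A =====
-- inner 'for k in range(j+1, len(arr))' with its break: returns count+1 at the first hit
def pvAInner (d : Int) (arr : List Int) (aj : Int) (count : Int) : List Int → Int
  | [] => count
  | k :: rest =>
      if PySem.List.pyGetD arr k 0 - aj = d then count + 1
      else pvAInner d arr aj count rest

def beautifulTriplets (d : Int) (arr : List Int) : Int :=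
  let n : Int := arr.length
  (PySem.List.pyRange 0 (n - 2) 1).foldl (fun count i =>
    (PySem.List.pyRange (i + 1) (n - 1) 1).foldl (fun count j =>
      if PySem.List.pyGetD arr j 0 - PySem.List.pyGetD arr i 0 = d then
        pvAInner d arr (PySem.List.pyGetD arr j 0) count (PySem.List.pyRange (j + 1) n 1)
      else count) count) 0

-- ===== PORT B =====
-- the backward index loop of Source B, ported right-to-left (j = n-1 … 0): state = (seen, has_next list)
def pvBBack (d : Int) : List Int → PySem.Set Int × List Bool
  | [] => (PySem.Set.empty, [])
  | x :: xs =>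
      let st := pvBBack d xs
      (PySem.Set.add st.1 x, PySem.Set.contains st.1 (x + d) :: st.2)

def beautifulTriplets_alt (d : Int) (arr : List Int) : Int :=
  let hasNext := (pvBBack d arr).2
  ((arr.zip hasNext).foldl
      (fun st p =>
        ((if p.2 then st.1 + st.2.getD (p.1 - d) 0 else st.1),
         st.2.insert p.1 (st.2.getD p.1 0 + 1)))
      (0, PySem.Dict.empty)).1

-- ===== PRECONDITION & SPEC =====
def Spec_beautifulTriplets (d : Int) (arr : List Int) (out : Int) : Prop := out = beautifulTriplets_alt d arr
instance (d : Int) (arr : List Int) (out : Int) : Decidable (Spec_beautifulTriplets d arr out) := by unfold Spec_beautifulTriplets; infer_instance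

-- ===== CLAIM (what is proved, stated in full; the proofs are below) =====
def Claim_equal_beautifulTriplets : Prop := ∀ (d : Int) (arr : List Int), Dom_beautifulTriplets d arr → Spec_beautifulTriplets d arr (beautifulTriplets d arr)

-- ===== LEMMAS AND PROOFS =====
-- pvK d arr j: some element after position j equals arr[j] + d (the inner 'k exists' condition)
abbrev pvK (d : Int) (arr : List Int) (j : Nat) : Prop :=
  (arr.drop (j + 1)).contains (arr.getD j 0 + d) = true
-- the common reference value: for each middle position j with pvK, count earlier copies of arr[j]-d
def pvS (d : Int) (arr : List Int) : Int :=
  ∑ j ∈ Finset.range arr.length,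
    (if pvK d arr j then ((arr.take j).count (arr.getD j 0 - d) : Int) else 0)

-- ===== B side =====
def pvHN (d : Int) : List Int → List Bool
  | [] => []
  | x :: xs => xs.contains (x + d) :: pvHN d xs

def pvBsum (d : Int) (p : List Int) : List Int → Int
  | [] => 0
  | x :: xs => (if xs.contains (x + d) then (p.count (x - d) : Int) else 0) + pvBsum d (p ++ [x]) xs

lemma pvBBack_spec (d : Int) (xs : List Int) :
    (∀ y, y ∈ (pvBBack d xs).1 ↔ y ∈ xs) ∧ (pvBBack d xs).2 = pvHN d xs := by
  induction xs with
  | nil => simp [pvBBack, pvHN, PySem.Set.empty]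
  | cons x xs ih =>
    refine ⟨fun y => ?_, ?_⟩
    · simp [pvBBack, PySem.Set.mem_add, ih.1 y]; tauto
    · simp only [pvBBack, pvHN, List.cons.injEq]
      refine ⟨?_, ih.2⟩
      simp only [PySem.Set.contains_eq_listContains, List.contains_eq_mem, ih.1]

lemma pvB_fold (d : Int) (xs : List Int) (p : List Int) (c : Int) (D : PySem.Dict Int Int)
    (hD : ∀ k, D.getD k 0 = (p.count k : Int)) :
    ((xs.zip (pvHN d xs)).foldl
      (fun st q =>
        ((if q.2 then st.1 + st.2.getD (q.1 - d) 0 else st.1),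
         st.2.insert q.1 (st.2.getD q.1 0 + 1)))
      (c, D)).1 = c + pvBsum d p xs := by
  induction xs generalizing p c D with
  | nil => simp [pvBsum]
  | cons x xs ih =>
    simp only [pvHN, List.zip_cons_cons, List.foldl_cons, pvBsum]
    rw [ih (p ++ [x]) _ _ (fun k => ?_)]
    · ring_nf; rw [hD]; split <;> ring
    · rw [PySem.Dict.getD_insert, hD]
      by_cases hk : k = x
      · subst hk; simp [List.count_append]
      · rw [if_neg hk, hD k, List.count_append]
        have h0 : List.count k [x] = 0 := List.count_eq_zero.mpr (by simp [hk])
        rw [h0]; simp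

lemma pvBsum_eq_sum (d : Int) (xs : List Int) (p : List Int) :
    pvBsum d p xs = ∑ j ∈ Finset.range xs.length,
      (if pvK d xs j then (((p ++ xs.take j).count (xs.getD j 0 - d)) : Int) else 0) := by
  induction xs generalizing p with
  | nil => simp [pvBsum]
  | cons x xs ih =>
    rw [pvBsum, ih (p ++ [x]), List.length_cons, Finset.sum_range_succ', add_comm]
    congr 1
    · apply Finset.sum_congr rfl
      intro j hj
      simp only [pvK, List.getD_cons_succ, List.drop_succ_cons, List.take_succ_cons]
      rw [show p ++ x :: List.take j xs = (p ++ [x]) ++ List.take j xs by simp]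
      try rfl

    · simp [pvK]

-- ===== A side =====
lemma pvAInner_eq (d : Int) (arr : List Int) (aj c : Int) (ks : List Int) :
    pvAInner d arr aj c ks =
      if ∃ k ∈ ks, PySem.List.pyGetD arr k 0 - aj = d then c + 1 else c := by
  induction ks with
  | nil => simp [pvAInner]
  | cons k rest ih =>
    by_cases h : PySem.List.pyGetD arr k 0 - aj = d
    · simp [pvAInner, h]
    · simp only [pvAInner, if_neg h, ih]
      congr 1
      simp [h]

lemma pvSum_range (n : Nat) (g : Nat → Int) :
    ((List.range n).map g).sum = ∑ i ∈ Finset.range n, g i := by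
  induction n with
  | zero => simp
  | succ n ih => rw [List.range_succ, Finset.sum_range_succ, List.map_append, List.sum_append, ih]; simp

lemma pvSum_pyRange (a b : Int) (f : Int → Int) :
    ((PySem.List.pyRange a b 1).map f).sum = ∑ k ∈ Finset.range (b - a).toNat, f (a + k) := by
  rw [PySem.List.pyRange_one, List.map_map, pvSum_range]
  rfl

def pvGI (d : Int) (arr : List Int) (i j : Int) : Int :=
  if (PySem.List.pyGetD arr j 0 - PySem.List.pyGetD arr i 0 = d ∧
      ((PySem.List.pyRange (j + 1) arr.length 1).any (fun k =>
        decide (PySem.List.pyGetD arr k 0 - PySem.List.pyGetD arr j 0 = d))) = true)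
  then 1 else 0

def pvGN (d : Int) (arr : List Int) (i j : Nat) : Int :=
  if (arr.getD j 0 - arr.getD i 0 = d ∧ pvK d arr j) then 1 else 0

lemma pvA_step1 (d : Int) (arr : List Int) :
    beautifulTriplets d arr =
      ((PySem.List.pyRange 0 ((arr.length : Int) - 2) 1).map (fun i =>
        ((PySem.List.pyRange (i + 1) ((arr.length : Int) - 1) 1).map (pvGI d arr i)).sum)).sum := by
  simp only [beautifulTriplets]
  have hinner : ∀ i : Int,
      (fun (count j : Int) =>
        if PySem.List.pyGetD arr j 0 - PySem.List.pyGetD arr i 0 = d then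
          pvAInner d arr (PySem.List.pyGetD arr j 0) count
            (PySem.List.pyRange (j + 1) (arr.length : Int) 1)
        else count)
      = fun count j => count + pvGI d arr i j := by
    intro i; funext count j
    rw [pvAInner_eq]
    simp only [pvGI, List.any_eq_true, decide_eq_true_iff]
    by_cases h1 : PySem.List.pyGetD arr j 0 - PySem.List.pyGetD arr i 0 = d
    · by_cases h2 : ∃ k ∈ PySem.List.pyRange (j + 1) (arr.length : Int) 1,
          PySem.List.pyGetD arr k 0 - PySem.List.pyGetD arr j 0 = d
      · rw [if_pos h1, if_pos h2, if_pos ⟨h1, h2⟩]; try ring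
      · rw [if_pos h1, if_neg h2, if_neg (fun hc => h2 hc.2)]; try ring
    · rw [if_neg h1, if_neg (fun hc => h1 hc.1)]; try ring
  have houter :
      (fun (count i : Int) =>
        (PySem.List.pyRange (i + 1) ((arr.length : Int) - 1) 1).foldl
          (fun count j =>
            if PySem.List.pyGetD arr j 0 - PySem.List.pyGetD arr i 0 = d then
              pvAInner d arr (PySem.List.pyGetD arr j 0) count
                (PySem.List.pyRange (j + 1) (arr.length : Int) 1)
            else count) count)
      = fun count i => count +
          ((PySem.List.pyRange (i + 1) ((arr.length : Int) - 1) 1).map (pvGI d arr i)).sum := by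
    funext count i
    rw [hinner i, PySem.List.foldl_add]
  rw [houter, PySem.List.foldl_add]
  simp

lemma pvEx_iff (d : Int) (arr : List Int) (j : Nat) (hj : j < arr.length) :
    ((PySem.List.pyRange ((j : Int) + 1) (arr.length : Int) 1).any (fun k =>
        decide (PySem.List.pyGetD arr k 0 - arr.getD j 0 = d)) = true)
      ↔ pvK d arr j := by
  rw [List.any_eq_true]
  unfold pvK
  rw [List.contains_iff_mem, List.mem_iff_getElem]
  constructor
  · rintro ⟨k, hk, hP⟩
    rw [PySem.List.mem_pyRange_one] at hk
    rw [decide_eq_true_iff] at hP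
    have hk0 : 0 ≤ k := by omega
    obtain ⟨m, rfl⟩ : ∃ m : Nat, k = (m : Int) := ⟨k.toNat, (Int.toNat_of_nonneg hk0).symm⟩
    have hm1 : j + 1 ≤ m := by exact_mod_cast hk.1
    have hm2 : m < arr.length := by exact_mod_cast hk.2
    refine ⟨m - (j + 1), by simp [List.length_drop]; omega, ?_⟩
    rw [List.getElem_drop]
    rw [PySem.List.pyGetD_natCast, List.getD_eq_getElem _ _ hm2,
        List.getD_eq_getElem _ _ hj] at hP
    have hIdx : j + 1 + (m - (j + 1)) = m := by omega
    simp only [hIdx]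
    rw [List.getD_eq_getElem _ _ hj]
    omega
  · rintro ⟨t, ht, hv⟩
    have htl : t < arr.length - (j + 1) := by simpa [List.length_drop] using ht
    refine ⟨((j + 1 + t : Nat) : Int), ?_, ?_⟩
    · rw [PySem.List.mem_pyRange_one]
      constructor <;> [push_cast; push_cast] <;> omega
    · rw [decide_eq_true_iff, PySem.List.pyGetD_natCast,
          List.getD_eq_getElem _ _ (by omega : j + 1 + t < arr.length),
          List.getD_eq_getElem _ _ hj]
      rw [List.getElem_drop] at hv
      rw [List.getD_eq_getElem _ _ hj] at hv
      omega

lemma pvGI_cast (d : Int) (arr : List Int) (i j : Nat) (hj : j < arr.length) :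
    pvGI d arr (i : Int) (j : Int) = pvGN d arr i j := by
  unfold pvGI pvGN
  simp only [PySem.List.pyGetD_natCast]
  by_cases hc : arr.getD j 0 - arr.getD i 0 = d
  · by_cases hk : pvK d arr j
    · rw [if_pos ⟨hc, ((pvEx_iff d arr j hj).mpr hk)⟩, if_pos ⟨hc, hk⟩]
    · rw [if_neg (fun hx => hk ((pvEx_iff d arr j hj).mp hx.2)), if_neg (fun hx => hk hx.2)]
  · rw [if_neg (fun hx => hc hx.1), if_neg (fun hx => hc hx.1)]

lemma pvA_step2 (d : Int) (arr : List Int) :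
    beautifulTriplets d arr =
      ∑ i ∈ Finset.range (arr.length - 2),
        ∑ j ∈ Finset.Ico (i + 1) (arr.length - 1), pvGN d arr i j := by
  rw [pvA_step1, pvSum_pyRange]
  have hb : ((arr.length : Int) - 2 - 0).toNat = arr.length - 2 := by omega
  rw [hb]
  apply Finset.sum_congr rfl
  intro i hi
  rw [Finset.mem_range] at hi
  rw [pvSum_pyRange]
  have hb2 : ((arr.length : Int) - 1 - (0 + (i : Int) + 1)).toNat = arr.length - 1 - (i + 1) := by
    omega
  rw [hb2, Finset.sum_Ico_eq_sum_range]
  apply Finset.sum_congr rfl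
  intro k hk
  rw [Finset.mem_range] at hk
  have hcast : (0 : Int) + (i : Int) + 1 + (k : Int) = ((i + 1 + k : Nat) : Int) := by push_cast; ring
  have hcast2 : (0 : Int) + (i : Int) = ((i : Nat) : Int) := by omega
  rw [hcast, hcast2, pvGI_cast d arr i (i + 1 + k) (by omega)]

lemma pvGN_zero (d : Int) (arr : List Int) (i j : Nat) (h : arr.length - 1 ≤ j) :
    pvGN d arr i j = 0 := by
  unfold pvGN
  rw [if_neg]
  rintro ⟨-, hx⟩
  unfold pvK at hx
  rw [List.drop_eq_nil_of_le (by omega)] at hx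
  simp at hx

lemma pvCountTake (arr : List Int) (c : Int) (j : Nat) (hj : j ≤ arr.length) :
    ∑ i ∈ Finset.range j, (if arr.getD i 0 = c then (1 : Int) else 0)
      = ((arr.take j).count c : Int) := by
  induction j with
  | zero => simp
  | succ j ih =>
    rw [Finset.sum_range_succ, ih (by omega), List.take_add_one]
    have hjl : j < arr.length := by omega
    rw [List.getElem?_eq_getElem hjl]
    simp only [Option.toList_some, List.count_append, List.getD_eq_getElem _ _ hjl]
    by_cases h : arr[j] = c
    · rw [if_pos h]; simp [h]
    · rw [if_neg h]; simp [h]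

lemma pvA_step3 (d : Int) (arr : List Int) :
    ∑ i ∈ Finset.range (arr.length - 2),
        ∑ j ∈ Finset.Ico (i + 1) (arr.length - 1), pvGN d arr i j = pvS d arr := by
  set L := arr.length with hL
  have h1 : ∀ i : Nat, ∑ j ∈ Finset.Ico (i + 1) (L - 1), pvGN d arr i j
      = ∑ j ∈ Finset.Ico (i + 1) L, pvGN d arr i j := by
    intro i
    apply Finset.sum_subset (Finset.Ico_subset_Ico le_rfl (by omega))
    intro j hj hnj
    rw [Finset.mem_Ico] at hj
    rw [Finset.mem_Ico] at hnj
    exact pvGN_zero d arr i j (by omega)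
  have h2 : ∑ i ∈ Finset.range (L - 2),
        ∑ j ∈ Finset.Ico (i + 1) (L - 1), pvGN d arr i j
      = ∑ i ∈ Finset.range L, ∑ j ∈ Finset.Ico (i + 1) L, pvGN d arr i j := by
    rw [Finset.sum_congr rfl (fun i _ => h1 i)]
    apply Finset.sum_subset
    · intro x hx
      rw [Finset.mem_range] at *
      omega
    intro i hi hni
    rw [Finset.mem_range] at hi
    rw [Finset.mem_range] at hni
    apply Finset.sum_eq_zero
    intro j hj
    rw [Finset.mem_Ico] at hj
    exact pvGN_zero d arr i j (by omega)
  rw [h2]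
  have h3 : ∑ i ∈ Finset.range L, ∑ j ∈ Finset.Ico (i + 1) L, pvGN d arr i j
      = ∑ i ∈ Finset.Ico 0 L, ∑ j ∈ Finset.Ico i L,
          (if i < j then pvGN d arr i j else 0) := by
    rw [← Finset.range_eq_Ico]
    apply Finset.sum_congr rfl
    intro i hi
    rw [Finset.mem_range] at hi
    rw [Finset.sum_eq_sum_Ico_succ_bot hi, if_neg (lt_irrefl i)]
    rw [zero_add]
    apply Finset.sum_congr rfl
    intro j hj
    rw [Finset.mem_Ico] at hj
    rw [if_pos (by omega)]
  rw [h3, Finset.sum_Ico_Ico_comm]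
  rw [← Finset.range_eq_Ico]
  unfold pvS
  apply Finset.sum_congr rfl
  intro j hj
  rw [Finset.mem_range] at hj
  have h4 : ∑ i ∈ Finset.range (j + 1), (if i < j then pvGN d arr i j else 0)
      = ∑ i ∈ Finset.range j, pvGN d arr i j := by
    rw [Finset.sum_range_succ, if_neg (lt_irrefl j), add_zero]
    apply Finset.sum_congr rfl
    intro i hi
    rw [Finset.mem_range] at hi
    rw [if_pos hi]
  rw [h4]
  by_cases hK : pvK d arr j
  · rw [if_pos hK]
    have : ∀ i ∈ Finset.range j, pvGN d arr i j
        = (if arr.getD i 0 = arr.getD j 0 - d then (1 : Int) else 0) := by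
      intro i hi
      unfold pvGN
      by_cases hc : arr.getD i 0 = arr.getD j 0 - d
      · rw [if_pos ⟨by omega, hK⟩, if_pos hc]
      · rw [if_neg (fun hx => hc (by omega)), if_neg hc]
    rw [Finset.sum_congr rfl this, pvCountTake arr _ j (by omega)]
  · rw [if_neg hK]
    apply Finset.sum_eq_zero
    intro i hi
    unfold pvGN
    rw [if_neg (fun hx => hK hx.2)]

lemma pvAlt_eq (d : Int) (arr : List Int) :
    beautifulTriplets_alt d arr = pvS d arr := by
  unfold beautifulTriplets_alt
  rw [(pvBBack_spec d arr).2,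
      pvB_fold d arr [] 0 PySem.Dict.empty (fun k => by simp [PySem.Dict.getD_empty]),
      pvBsum_eq_sum]
  simp [pvS]

-- ===== VERDICT (by name: the statement is the Claim_ definition above) =====
theorem beautifulTriplets_spec : Claim_equal_beautifulTriplets := by
  intro d arr _
  unfold Spec_beautifulTriplets
  rw [pvA_step2, pvA_step3, pvAlt_eq]
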